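-- pv_equiv track=rewrite | github.com/matthiasplappert/motion-classification | src/evaluate_features.py | feature_indexes_from_set
-- ===== SOURCE A (Python) =====
-- def feature_indexes_from_set(all_features, feature_set, lengths):
--     indexes = []
--     idx = 0
--     for feature, length in zip(all_features, lengths):
--         if feature in feature_set:
--             indexes.extend(range(idx, idx + length))
--         idx += length
--     return indexes
-- ===== SOURCE B (Python) =====
-- def feature_indexes_from_set(all_features, feature_set, lengths):
--     n = min(len(all_features), len(lengths))
--     starts = [0]
--     for length in lengths[:n]:
--         starts.append(starts[-1] + length)
--     fs = set(feature_set)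
--     return [j
--             for i in range(n) if all_features[i] in fs
--             for j in range(starts[i], starts[i] + lengths[i])]
-- ===== Notes on version B (the rewrite author's own statement) =====
-- stated objective: alternative
-- what changed: Replaces the single loop threading a running idx with a two-phase decomposition: first a prefix-sum table of feature start offsets, then a comprehension that emits the block range for each selected feature; membership is tested against a set built once.
import Mathlib
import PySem

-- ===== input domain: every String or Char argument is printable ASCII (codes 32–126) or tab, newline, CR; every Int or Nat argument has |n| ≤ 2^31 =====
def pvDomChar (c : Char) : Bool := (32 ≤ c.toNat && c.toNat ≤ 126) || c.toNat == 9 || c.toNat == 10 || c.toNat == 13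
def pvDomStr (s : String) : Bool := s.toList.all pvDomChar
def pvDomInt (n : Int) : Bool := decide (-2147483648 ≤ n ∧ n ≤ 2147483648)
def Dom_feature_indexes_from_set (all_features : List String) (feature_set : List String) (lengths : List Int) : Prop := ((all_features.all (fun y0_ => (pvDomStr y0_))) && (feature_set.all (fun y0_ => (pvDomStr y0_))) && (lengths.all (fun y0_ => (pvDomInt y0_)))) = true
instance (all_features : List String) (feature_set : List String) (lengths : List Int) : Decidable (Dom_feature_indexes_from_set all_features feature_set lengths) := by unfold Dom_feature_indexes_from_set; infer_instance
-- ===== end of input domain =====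

-- B splits A's single idx-threading loop into a prefix-sum table of start offsets plus a
-- comprehension collecting the block of each selected feature (alternative decomposition).

-- ===== PORT A =====
-- single pass over zip(all_features, lengths), threading (indexes, idx)
def feature_indexes_from_set (all_features : List String) (feature_set : List String) (lengths : List Int) : List Int :=
  ((all_features.zip lengths).foldl
    (fun (st : List Int × Int) fl =>
      (if feature_set.contains fl.1 then st.1 ++ PySem.List.pyRange st.2 (st.2 + fl.2) 1 else st.1,
       st.2 + fl.2))
    ([], 0)).1

-- ===== PORT B =====
-- prefix-sum table 'starts' built first, then a flat comprehension over range(n)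
def feature_indexes_from_set_alt (all_features : List String) (feature_set : List String) (lengths : List Int) : List Int :=
  let n := min all_features.length lengths.length
  let starts := (lengths.take n).foldl (fun acc L => acc ++ [acc.getLastD 0 + L]) [0]
  let fs := PySem.Set.ofList feature_set
  (List.range n).flatMap (fun i =>
    if fs.contains (all_features.getD i "") then
      PySem.List.pyRange (starts.getD i 0) (starts.getD i 0 + lengths.getD i 0) 1
    else [])

-- ===== PRECONDITION & SPEC =====
def Spec_feature_indexes_from_set (all_features : List String) (feature_set : List String) (lengths : List Int) (out : List Int) : Prop := out = feature_indexes_from_set_alt all_features feature_set lengths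
instance (all_features : List String) (feature_set : List String) (lengths : List Int) (out : List Int) : Decidable (Spec_feature_indexes_from_set all_features feature_set lengths out) := by unfold Spec_feature_indexes_from_set; infer_instance

-- ===== CLAIM =====
def Claim_equal_feature_indexes_from_set : Prop := ∀ (all_features : List String) (feature_set : List String) (lengths : List Int), Dom_feature_indexes_from_set all_features feature_set lengths → Spec_feature_indexes_from_set all_features feature_set lengths (feature_indexes_from_set all_features feature_set lengths)

-- ===== LEMMAS AND PROOFS =====

-- canonical recursion both ports are reduced to
def pvCanon (setl : List String) : List String → List Int → Int → List Int
  | [], _, _ => []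
  | _ :: _, [], _ => []
  | f :: fs, L :: Ls, s =>
    (if setl.contains f then PySem.List.pyRange s (s + L) 1 else []) ++ pvCanon setl fs Ls (s + L)

-- partial sums starting strictly after s
def pvPsums (s : Int) : List Int → List Int
  | [] => []
  | L :: Ls => (s + L) :: pvPsums (s + L) Ls

theorem pvA_eq_canon (setl : List String) :
    ∀ (fs : List String) (Ls : List Int) (acc : List Int) (s : Int),
      ((fs.zip Ls).foldl
        (fun (st : List Int × Int) fl =>
          (if setl.contains fl.1 then st.1 ++ PySem.List.pyRange st.2 (st.2 + fl.2) 1 else st.1,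
           st.2 + fl.2)) (acc, s)).1 = acc ++ pvCanon setl fs Ls s := by
  intro fs
  induction fs with
  | nil => intro Ls acc s; simp [pvCanon]
  | cons f fsT ih =>
    intro Ls acc s
    cases Ls with
    | nil => simp [pvCanon]
    | cons L LsT =>
      simp only [List.zip_cons_cons, List.foldl_cons, pvCanon]
      rw [ih]
      by_cases h : f ∈ setl <;> simp [h, List.append_assoc]

theorem pvStarts_eq (Ls : List Int) :
    ∀ (acc : List Int) (x : Int),
      Ls.foldl (fun acc L => acc ++ [acc.getLastD 0 + L]) (acc ++ [x]) =
        (acc ++ [x]) ++ pvPsums x Ls := by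
  induction Ls with
  | nil => intro acc x; simp [pvPsums]
  | cons L LsT ih =>
    intro acc x
    simp only [List.foldl_cons, pvPsums]
    have hl : (acc ++ [x]).getLastD 0 = x := by simp
    rw [hl]
    have := ih (acc ++ [x]) (x + L)
    simp only [List.append_assoc] at this ⊢
    exact this

theorem pvContains_ofList (setl : List String) (x : String) :
    (PySem.Set.ofList setl).contains x = setl.contains x := by
  rw [Bool.eq_iff_iff]
  simp [PySem.Set.contains, PySem.Set.mem_ofList]

theorem pvB_eq_canon (setl : List String) :
    ∀ (fs : List String) (Ls : List Int) (s : Int),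
      (List.range (min fs.length Ls.length)).flatMap (fun i =>
        if setl.contains (fs.getD i "") then
          PySem.List.pyRange ((s :: pvPsums s Ls).getD i 0)
            ((s :: pvPsums s Ls).getD i 0 + Ls.getD i 0) 1
        else []) = pvCanon setl fs Ls s := by
  intro fs
  induction fs with
  | nil => intro Ls s; simp [pvCanon]
  | cons f fsT ih =>
    intro Ls s
    cases Ls with
    | nil => simp [pvCanon]
    | cons L LsT =>
      have hmin : min (f :: fsT).length (L :: LsT).length = min fsT.length LsT.length + 1 := by
        simp only [List.length_cons]; omega
      rw [hmin, List.range_succ_eq_map, List.flatMap_cons, List.flatMap_map]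
      simp only [List.getD_cons_zero, List.getD_cons_succ, pvPsums, pvCanon]
      congr 1
      exact ih LsT (s + L)

theorem pvCanon_take (setl : List String) :
    ∀ (fs : List String) (Ls : List Int) (s : Int) (n : Nat), fs.length ≤ n →
      pvCanon setl fs (Ls.take n) s = pvCanon setl fs Ls s := by
  intro fs
  induction fs with
  | nil => intro Ls s n _; simp [pvCanon]
  | cons f fsT ih =>
    intro Ls s n hn
    cases Ls with
    | nil => simp [pvCanon]
    | cons L LsT =>
      cases n with
      | zero => simp at hn
      | succ m =>
        simp only [List.take_succ_cons, pvCanon]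
        rw [ih LsT (s + L) m (by simpa using hn)]

-- ===== VERDICT =====
theorem feature_indexes_from_set_spec : Claim_equal_feature_indexes_from_set := by
  intro all_features feature_set lengths _
  unfold Spec_feature_indexes_from_set feature_indexes_from_set feature_indexes_from_set_alt
  dsimp only
  rw [pvA_eq_canon feature_set all_features lengths [] 0, List.nil_append]
  set n := min all_features.length lengths.length with hn
  have hstarts : (lengths.take n).foldl (fun acc L => acc ++ [acc.getLastD 0 + L]) [0] =
      (0 : Int) :: pvPsums 0 (lengths.take n) := by
    have := pvStarts_eq (lengths.take n) [] 0
    simpa using this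
  rw [hstarts]
  simp only [pvContains_ofList]
  have hcongr : (List.range n).map (fun i =>
      if feature_set.contains (all_features.getD i "") then
        PySem.List.pyRange (((0 : Int) :: pvPsums 0 (lengths.take n)).getD i 0)
          (((0 : Int) :: pvPsums 0 (lengths.take n)).getD i 0 + lengths.getD i 0) 1
      else []) =
      (List.range n).map (fun i =>
      if feature_set.contains (all_features.getD i "") then
        PySem.List.pyRange (((0 : Int) :: pvPsums 0 (lengths.take n)).getD i 0)
          (((0 : Int) :: pvPsums 0 (lengths.take n)).getD i 0 + (lengths.take n).getD i 0) 1
      else []) := by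
    apply List.map_congr_left
    intro i hi
    have hi' : i < n := List.mem_range.mp hi
    have hg : lengths.getD i 0 = (lengths.take n).getD i 0 := by
      simp [List.getD_eq_getElem?_getD, List.getElem?_take_of_lt, hi']
    rw [hg]
  have hmin' : min all_features.length (lengths.take n).length = n := by
    simp only [List.length_take, hn]; omega
  have hB := pvB_eq_canon feature_set all_features (lengths.take n) 0
  rw [hmin'] at hB
  rw [List.flatMap_def, hcongr, ← List.flatMap_def, hB]
  rcases le_total all_features.length lengths.length with h | h
  · exact (pvCanon_take feature_set all_features lengths 0 n (by omega)).symm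
  · have hne : n = lengths.length := by omega
    rw [hne, List.take_length]
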